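-- pv_equiv track=rewrite | github.com/15091444119/MASS | MASS-unsupNMT/src/evaluation/eval_context_combiner/dataset.py | filter_not_one2one_alignment
-- ===== SOURCE A (Python) =====
-- def filter_not_one2one_alignment(src_bped_sentences, tgt_bped_sentences, alignments):
--     """
--     Args:
--         src_bped_sentences:
--         tgt_bped_sentences:
--         alignments:
--
--     Returns:
--
--     """
--     final_src_bped_sentences = []
--     final_tgt_bped_sentences = []
--     final_alignments = []
--     for src_bped_sentence, tgt_bped_sentence, alignment in zip(src_bped_sentences, tgt_bped_sentences, alignments):
--         alignment = filter_alignment_one2one(alignment)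
--         if alignment == "":
--             continue
--         else:
--             final_src_bped_sentences.append(src_bped_sentence)
--             final_tgt_bped_sentences.append(tgt_bped_sentence)
--             final_alignments.append(alignment)
--
--     return final_src_bped_sentences, final_tgt_bped_sentences, final_alignments
--
-- def filter_alignment_one2one(alignment):
--     """ Delete one to many and many to one in the alignment
--     Params:
--         alignment: fastalign output, like "0-0 1-1 2-3"
--     Returns:
--         one-one alignment
--     Example:
--         alignment: "0-0 0-1 1-2 2-2 3-2 4-4"
--         output: "4-4"
--     """
--     s2t = {}
--     t2s = {}
--     for word_align in alignment.rstrip().split(' '):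
--         src_id, tgt_id = word_align.split('-')
--         if src_id not in s2t:
--             s2t[src_id] = [tgt_id]
--         else:
--             s2t[src_id].append(tgt_id)
--         if tgt_id not in t2s:
--             t2s[tgt_id] = [src_id]
--         else:
--             t2s[tgt_id].append(src_id)
--
--     filtered_alignment = []
--     for src_id, tgt_id_list in s2t.items():
--         if len(tgt_id_list) == 1:
--             if len(t2s[tgt_id_list[0]]) == 1:
--                 filtered_alignment.append("{}-{}".format(src_id, tgt_id_list[0]))
--
--     return ' '.join(filtered_alignment)
-- ===== SOURCE B (Python) =====
-- def _one2one(alignment):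
--     # parse "s-t" tokens (ValueError on malformed tokens, exactly like A's unpacking)
--     pairs = []
--     for wa in alignment.rstrip().split(' '):
--         s, t = wa.split('-')
--         pairs.append((s, t))
--     # a pair is kept iff it is independent of every OTHER pair: no other
--     # occurrence shares its source or its target (no dicts, no counting)
--     n = len(pairs)
--     kept = []
--     for i in range(n):
--         s, t = pairs[i]
--         if all(j == i or (pairs[j][0] != s and pairs[j][1] != t) for j in range(n)):
--             kept.append(s + '-' + t)
--     return ' '.join(kept)
--
--
-- def filter_not_one2one_alignment(src_bped_sentences, tgt_bped_sentences, alignments):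
--     triples = [(s, t, _one2one(a)) for s, t, a in zip(src_bped_sentences, tgt_bped_sentences, alignments)]
--     return ([s for s, _, fa in triples if fa != ""],
--             [t for _, t, fa in triples if fa != ""],
--             [fa for _, _, fa in triples if fa != ""])
-- ===== Notes on version B (the rewrite author's own statement) =====
-- stated objective: alternative
-- what changed: The inner filter drops A's two dicts-of-lists (src->tgts, tgt->srcs) and its scan over dict items entirely: B parses the pairs once and keeps a pair iff an all() scan over the other pairs finds no other occurrence sharing its source or its target (a pairwise independence test, quadratic, no dictionaries); the outer loop precomputes the filtered triples and projects them with three comprehensions.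
import Mathlib
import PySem

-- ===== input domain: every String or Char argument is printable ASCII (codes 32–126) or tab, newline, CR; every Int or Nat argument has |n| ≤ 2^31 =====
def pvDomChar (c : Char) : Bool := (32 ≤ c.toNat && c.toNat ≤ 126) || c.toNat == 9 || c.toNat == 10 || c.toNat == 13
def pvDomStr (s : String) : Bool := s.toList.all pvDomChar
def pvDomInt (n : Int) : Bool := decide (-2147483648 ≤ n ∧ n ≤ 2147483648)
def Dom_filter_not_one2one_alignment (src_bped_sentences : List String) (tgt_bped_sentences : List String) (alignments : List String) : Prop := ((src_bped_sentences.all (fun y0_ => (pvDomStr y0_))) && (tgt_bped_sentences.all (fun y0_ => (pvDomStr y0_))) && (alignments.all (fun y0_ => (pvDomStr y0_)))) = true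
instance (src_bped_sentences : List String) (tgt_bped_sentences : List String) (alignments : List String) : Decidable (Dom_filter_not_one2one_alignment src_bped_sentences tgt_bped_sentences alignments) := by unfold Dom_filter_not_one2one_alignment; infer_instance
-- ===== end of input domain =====

-- ===== PORT A =====
-- B drops A's dicts-of-lists + dict-items scan for a pairwise independence test over the parsed pairs (objective: alternative).

-- s.split(sep) for the nonempty separators used here (" " and "-"); split? is none only for sep = ""
def pvSplit (s sep : String) : List String := (PySem.Str.split? s sep).getD []

-- one iteration of A's parsing loop; none = ValueError from 'src_id, tgt_id = word_align.split('-')'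
def pvStepA (acc : Option (PySem.Dict String (List String) × PySem.Dict String (List String)))
    (wa : String) : Option (PySem.Dict String (List String) × PySem.Dict String (List String)) :=
  acc.bind (fun st =>
    match pvSplit wa "-" with
    | [src, tgt] =>
        some ((if st.1.contains src then st.1.insert src (st.1.getD src [] ++ [tgt]) else st.1.insert src [tgt]),
              (if st.2.contains tgt then st.2.insert tgt (st.2.getD tgt [] ++ [src]) else st.2.insert tgt [src]))
    | _ => none)

-- filter_alignment_one2one; none = the ValueError A raises on a malformed token
def pvFilterOne2OneA (alignment : String) : Option String :=
  match (pvSplit (PySem.Str.rstrip alignment) " ").foldl pvStepA (some (PySem.Dict.empty, PySem.Dict.empty)) with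
  | none => none
  | some st =>
      -- kv.2.headD "" is tgt_id_list[0]; the list is nonempty whenever the guard len == 1 holds
      some (PySem.Str.join " " (st.1.items.foldl (fun acc kv =>
        if kv.2.length == 1 && (st.2.getD (kv.2.headD "") []).length == 1
        then acc ++ [kv.1 ++ "-" ++ kv.2.headD ""] else acc) []))

def filter_not_one2one_alignment (src_bped_sentences : List String) (tgt_bped_sentences : List String) (alignments : List String) : List String × List String × List String :=
  (src_bped_sentences.zip (tgt_bped_sentences.zip alignments)).foldl (fun acc x =>
    match pvFilterOne2OneA x.2.2 with
    | none => acc   -- the Python raises ValueError here; such inputs are outside Pre_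
    | some al => if al == "" then acc
        else (acc.1 ++ [x.1], acc.2.1 ++ [x.2.1], acc.2.2 ++ [al])) ([], [], [])

-- ===== PORT B =====
-- 's, t = wa.split('-')' of B's parsing loop; none = ValueError
def pvPairB (wa : String) : Option (String × String) :=
  match pvSplit wa "-" with
  | [s, t] => some (s, t)
  | _ => none

-- _one2one of Source B; none = the ValueError on a malformed token.
-- pairs[i] / pairs[j] are ported as getD with a dummy default: i, j come from range(n), so they are in bounds.
def pvOne2OneB (alignment : String) : Option String :=
  match (pvSplit (PySem.Str.rstrip alignment) " ").mapM pvPairB with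
  | none => none
  | some pairs =>
      some (PySem.Str.join " "
        ((List.range pairs.length).foldl (fun kept i =>
            if (List.range pairs.length).all (fun j =>
                 j == i || (!((pairs.getD j ("", "")).1 == (pairs.getD i ("", "")).1)
                            && !((pairs.getD j ("", "")).2 == (pairs.getD i ("", "")).2)))
            then kept ++ [(pairs.getD i ("", "")).1 ++ "-" ++ (pairs.getD i ("", "")).2]
            else kept) []))

def filter_not_one2one_alignment_alt (src_bped_sentences : List String) (tgt_bped_sentences : List String) (alignments : List String) : List String × List String × List String :=
  match (src_bped_sentences.zip (tgt_bped_sentences.zip alignments)).mapM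
      (fun x => (pvOne2OneB x.2.2).map (fun fa => (x.1, x.2.1, fa))) with
  | none => ([], [], [])   -- the Python raises ValueError here; such inputs are outside Pre_
  | some triples =>
      ((triples.filter (fun y => y.2.2 != "")).map (·.1),
       (triples.filter (fun y => y.2.2 != "")).map (·.2.1),
       (triples.filter (fun y => y.2.2 != "")).map (·.2.2))

-- ===== PRECONDITION & SPEC =====
-- Pre_ excludes exactly the inputs on which the Python A raises ValueError: some processed
-- alignment has a token that does not split on '-' into exactly two fields.
def Pre_filter_not_one2one_alignment (src_bped_sentences : List String) (tgt_bped_sentences : List String) (alignments : List String) : Prop :=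
  ∀ x ∈ src_bped_sentences.zip (tgt_bped_sentences.zip alignments),
    ∀ wa ∈ pvSplit (PySem.Str.rstrip x.2.2) " ", (pvSplit wa "-").length = 2
instance (src_bped_sentences : List String) (tgt_bped_sentences : List String) (alignments : List String) : Decidable (Pre_filter_not_one2one_alignment src_bped_sentences tgt_bped_sentences alignments) := by unfold Pre_filter_not_one2one_alignment; infer_instance

def pvWitness_filter_not_one2one_alignment : List String × List String × List String :=
  (["a b", "c d"], ["x y", "z w"], ["0-0 1-1", "0-0 0-1"])

def Spec_filter_not_one2one_alignment (src_bped_sentences : List String) (tgt_bped_sentences : List String) (alignments : List String) (out : List String × List String × List String) : Prop := out = filter_not_one2one_alignment_alt src_bped_sentences tgt_bped_sentences alignments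
instance (src_bped_sentences : List String) (tgt_bped_sentences : List String) (alignments : List String) (out : List String × List String × List String) : Decidable (Spec_filter_not_one2one_alignment src_bped_sentences tgt_bped_sentences alignments out) := by unfold Spec_filter_not_one2one_alignment; infer_instance

-- ===== CLAIM (what is proved, stated in full; the proofs are below) =====
def Claim_equal_filter_not_one2one_alignment : Prop := ∀ (src_bped_sentences : List String) (tgt_bped_sentences : List String) (alignments : List String), Dom_filter_not_one2one_alignment src_bped_sentences tgt_bped_sentences alignments → Pre_filter_not_one2one_alignment src_bped_sentences tgt_bped_sentences alignments → Spec_filter_not_one2one_alignment src_bped_sentences tgt_bped_sentences alignments (filter_not_one2one_alignment src_bped_sentences tgt_bped_sentences alignments)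

-- ===== LEMMAS AND PROOFS =====

-- the common characterisation both inner loops reduce to: a pair is kept iff its
-- source occurs once among all sources and its target once among all targets
def pvKeepP (pairs : List (String × String)) (q : String × String) : Bool :=
  (pairs.countP (fun r => r.1 == q.1) == 1) && (pairs.countP (fun r => r.2 == q.2) == 1)

-- proof-side canonical parse of a well-formed token "s-t"
def pvPairD (wa : String) : String × String :=
  ((pvSplit wa "-").headD "", ((pvSplit wa "-").tail).headD "")

-- first-occurrence dedup, by the remove-the-key recursion (proof-side model of dict key order)
def pvDedup : List String → List String
  | [] => []
  | x :: xs => x :: pvDedup (xs.filter (fun y => y ≠ x))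
  termination_by l => l.length
  decreasing_by simpa using Nat.lt_succ_of_le ((List.length_filter_le _ xs.attach).trans (le_of_eq (by simp)))

theorem pv_foldA_none (toks : List String) : toks.foldl pvStepA none = none := by
  induction toks with
  | nil => rfl
  | cons w ws ih => simpa [pvStepA] using ih

theorem pv_ins_collapse (d : PySem.Dict String (List String)) (k v : String) :
    (if d.contains k then d.insert k (d.getD k [] ++ [v]) else d.insert k [v])
      = d.insert k (d.getD k [] ++ [v]) := by
  by_cases h : d.contains k
  · simp [h]
  · simp [h, PySem.Dict.getD_of_not_contains d ([] : List String) (by simpa using h)]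

theorem pv_foldA_good (toks : List String) (h : ∀ w ∈ toks, (pvSplit w "-").length = 2) :
    ∀ st, toks.foldl pvStepA (some st)
      = some ((toks.map pvPairD).foldl (fun st p =>
          (st.1.insert p.1 (st.1.getD p.1 [] ++ [p.2]),
           st.2.insert p.2 (st.2.getD p.2 [] ++ [p.1]))) st) := by
  induction toks with
  | nil => intro st; rfl
  | cons w ws ih =>
      intro st
      obtain ⟨s, t, hw⟩ := List.length_eq_two.mp (h w (by simp))
      simp only [List.foldl_cons, List.map_cons, pvStepA, Option.bind_some, hw]
      rw [ih (fun w hmem => h w (by simp [hmem]))]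
      simp [pvPairD, hw, pv_ins_collapse]

theorem pv_foldA_bad (toks : List String) (h : ¬ ∀ w ∈ toks, (pvSplit w "-").length = 2) :
    ∀ st, toks.foldl pvStepA (some st) = none := by
  induction toks with
  | nil => exact absurd (by simp) h
  | cons w ws ih =>
      intro st
      by_cases hw : (pvSplit w "-").length = 2
      · obtain ⟨s, t, hw2⟩ := List.length_eq_two.mp hw
        simp only [List.foldl_cons, pvStepA, Option.bind_some, hw2]
        exact ih (fun hall => h (List.forall_mem_cons.mpr ⟨hw, hall⟩)) _
      · simp only [List.foldl_cons, pvStepA, Option.bind_some]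
        have : (match pvSplit w "-" with
            | [src, tgt] => some ((if (st.1).contains src = true then (st.1).insert src ((st.1).getD src [] ++ [tgt]) else (st.1).insert src [tgt]),
                (if (st.2).contains tgt = true then (st.2).insert tgt ((st.2).getD tgt [] ++ [src]) else (st.2).insert tgt [src]))
            | _ => none) = (none : Option (PySem.Dict String (List String) × PySem.Dict String (List String))) := by
          rcases hsp : pvSplit w "-" with _ | ⟨a, _ | ⟨b, _ | ⟨c, l⟩⟩⟩ <;> simp_all
        rw [this]
        exact pv_foldA_none ws

theorem pv_mapM_good (toks : List String) (h : ∀ w ∈ toks, (pvSplit w "-").length = 2) :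
    toks.mapM pvPairB = some (toks.map pvPairD) := by
  induction toks with
  | nil => rfl
  | cons w ws ih =>
      obtain ⟨s, t, hw⟩ := List.length_eq_two.mp (h w (by simp))
      rw [List.mapM_cons, ih (fun w hmem => h w (by simp [hmem]))]
      simp [pvPairB, pvPairD, hw]

theorem pv_mapM_bad (toks : List String) (h : ¬ ∀ w ∈ toks, (pvSplit w "-").length = 2) :
    toks.mapM pvPairB = none := by
  induction toks with
  | nil => exact absurd (by simp) h
  | cons w ws ih =>
      rw [List.mapM_cons]
      by_cases hw : (pvSplit w "-").length = 2
      · obtain ⟨s, t, hw2⟩ := List.length_eq_two.mp hw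
        rw [ih (fun hall => h (List.forall_mem_cons.mpr ⟨hw, hall⟩))]
        simp [pvPairB, hw2]
      · have : pvPairB w = none := by
          unfold pvPairB
          rcases hsp : pvSplit w "-" with _ | ⟨a, _ | ⟨b, _ | ⟨c, l⟩⟩⟩ <;> simp_all
        simp [this]

theorem pv_getD_grp {β : Type} (key val : β → String) (l : List β) :
    ∀ (d : PySem.Dict String (List String)) (c : String),
      (l.foldl (fun d p => d.insert (key p) (d.getD (key p) [] ++ [val p])) d).getD c []
        = d.getD c [] ++ (l.filter (fun p => key p == c)).map val := by
  induction l with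
  | nil => intro d c; simp
  | cons p ps ih =>
      intro d c
      simp only [List.foldl_cons]
      rw [ih]
      by_cases hc : key p = c
      · subst hc
        simp
      · rw [PySem.Dict.getD_insert]
        simp [hc, Ne.symm hc]

theorem pv_update_eq_pvDedup (xs : List String) :
    ∀ s : List String, xs.foldl PySem.Set.add s = s ++ pvDedup (xs.filter (fun y => !s.contains y)) := by
  induction xs with
  | nil => intro s; simp [pvDedup]
  | cons x xs ih =>
      intro s
      simp only [List.foldl_cons]
      by_cases hx : s.contains x
      · have hx2 : PySem.Set.contains s x = true := hx
        have hadd : PySem.Set.add s x = s := by unfold PySem.Set.add; rw [if_pos hx2]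
        have hc : (!s.contains x) = false := by rw [hx]; rfl
        rw [hadd, ih, List.filter_cons, hc]
        simp only [Bool.false_eq_true, if_false]
      · have hx2 : ¬ PySem.Set.contains s x = true := hx
        have hx' : s.contains x = false := by revert hx; cases s.contains x <;> simp
        have hadd : PySem.Set.add s x = s ++ [x] := by
          unfold PySem.Set.add; rw [if_neg hx2]
        rw [hadd, ih, List.filter_cons]
        have hxk : (!s.contains x) = true := by rw [hx']; rfl
        simp only [hxk, if_true]
        simp only [pvDedup]
        rw [List.filter_filter]
        have hfe : (xs.filter (fun y => !(s ++ [x]).contains y))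
            = xs.filter (fun y => decide (y ≠ x) && !s.contains y) := by
          apply List.filter_congr
          intro y _
          by_cases hyx : y = x <;> simp [hyx]
        rw [hfe]
        simp

theorem pv_pvDedup_filter_aux (n : Nat) : ∀ (xs : List String), xs.length ≤ n →
    ∀ Q : String → Bool, (∀ x ∈ xs, Q x = true → xs.count x = 1) →
      (pvDedup xs).filter Q = xs.filter Q := by
  induction n with
  | zero =>
      intro xs hlen Q h
      have : xs = [] := List.eq_nil_of_length_eq_zero (Nat.le_zero.mp hlen)
      subst this
      simp [pvDedup]
  | succ n ihn =>
      intro xs hlen Q h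
      match xs with
      | [] => simp [pvDedup]
      | x :: xs =>
          simp only [pvDedup]
          by_cases hQ : Q x = true
          · have hcount := h x (by simp) hQ
            have hnx : x ∉ xs := by
              intro hmem
              have h1 : 0 < xs.count x := List.count_pos_iff.mpr hmem
              have h2 : (x :: xs).count x = xs.count x + 1 := List.count_cons_self
              omega
            have hfe : xs.filter (fun y => y ≠ x) = xs := by
              apply List.filter_eq_self.mpr
              intro y hy
              simp only [ne_eq, decide_eq_true_eq]
              intro e; exact hnx (by rwa [e] at hy)
            rw [hfe]
            simp only [List.filter_cons, hQ, if_true]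
            congr 1
            apply ihn xs (by simpa using Nat.le_of_succ_le_succ hlen) Q
            intro y hy hQy
            have h1 := h y (by simp [hy]) hQy
            by_cases hyx : y = x
            · exact absurd (by rwa [hyx] at hy) hnx
            · have hcc : List.count y (x :: xs) = List.count y xs := by
                exact List.count_cons_of_ne (fun e => hyx e.symm)
              omega
          · have hQ' : Q x = false := by revert hQ; cases Q x <;> simp
            simp only [List.filter_cons, hQ', Bool.false_eq_true, if_false]
            rw [ihn (xs.filter (fun y => y ≠ x))
                (le_trans (List.length_filter_le _ _) (by simpa using Nat.le_of_succ_le_succ hlen)) Q]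
            · rw [List.filter_filter]
              apply List.filter_congr
              intro y hy
              by_cases hyx : y = x
              · subst hyx; simp [hQ']
              · simp [hyx]
            · intro y hy hQy
              have hyx : y ≠ x := by simpa using (List.mem_filter.mp hy).2
              have hymem : y ∈ xs := (List.mem_filter.mp hy).1
              have h1 := h y (by simp [hymem]) hQy
              have hcc : List.count y (x :: xs) = List.count y xs := by
                exact List.count_cons_of_ne (fun e => hyx e.symm)
              have hcf : List.count y (xs.filter (fun y => y ≠ x)) = List.count y xs :=
                List.count_filter (by simpa using hyx)
              omega

theorem pv_pvDedup_filter (xs : List String) (Q : String → Bool)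
    (h : ∀ x ∈ xs, Q x = true → xs.count x = 1) :
    (pvDedup xs).filter Q = xs.filter Q :=
  pv_pvDedup_filter_aux xs.length xs (Nat.le_refl _) Q h

theorem pv_filter_singleton {β : Type} [DecidableEq β] (key : β → String) (l : List β) (p : β)
    (hp : p ∈ l) (h1 : l.countP (fun q => key q == key p) = 1) :
    l.filter (fun q => key q == key p) = [p] := by
  have hlen : (l.filter (fun q => key q == key p)).length = 1 := by
    rw [← List.countP_eq_length_filter]; exact h1
  have hmem : p ∈ l.filter (fun q => key q == key p) := by
    simp [List.mem_filter, hp]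
  rcases hx : l.filter (fun q => key q == key p) with _ | ⟨x, _ | ⟨y, r⟩⟩
  · simp [hx] at hmem
  · rw [hx] at hmem
    have hpx : p = x := by simpa using hmem
    simp [hpx]
  · rw [hx] at hlen; simp at hlen

theorem pv_count_eq_countP (pairs : List (String × String)) (k : String) :
    (pairs.map Prod.fst).count k = pairs.countP (fun q => q.1 == k) := by
  rw [List.count, List.countP_map]
  rfl

theorem pv_map_filter_congr {α β : Type} (l : List α) (P₁ P₂ : α → Bool) (F₁ F₂ : α → β)
    (hP : ∀ x ∈ l, P₁ x = P₂ x) (hF : ∀ x ∈ l, P₂ x = true → F₁ x = F₂ x) :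
    (l.filter P₁).map F₁ = (l.filter P₂).map F₂ := by
  rw [List.filter_congr hP]
  apply List.map_congr_left
  intro x hx
  exact hF x (List.mem_filter.mp hx).1 (List.mem_filter.mp hx).2

-- A's inner loop (dicts-of-lists + scan over dict items) computes the pvKeepP filter
theorem pv_inner_eqA (pairs : List (String × String)) :
    (List.foldl
      (fun acc kv =>
        if (kv.2.length == 1 &&
            ((List.foldl (fun st p => (st.1.insert p.1 (st.1.getD p.1 [] ++ [p.2]), st.2.insert p.2 (st.2.getD p.2 [] ++ [p.1])))
                (PySem.Dict.empty, PySem.Dict.empty) pairs).2.getD (kv.2.headD "") []).length == 1) = true then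
          acc ++ [kv.1 ++ "-" ++ kv.2.headD ""]
        else acc)
      []
      ((List.foldl (fun st p => (st.1.insert p.1 (st.1.getD p.1 [] ++ [p.2]), st.2.insert p.2 (st.2.getD p.2 [] ++ [p.1])))
          (PySem.Dict.empty, PySem.Dict.empty) pairs).1.items))
    = (pairs.filter (pvKeepP pairs)).map (fun p => p.1 ++ "-" ++ p.2) := by
  have hsplit : List.foldl (fun st p => (st.1.insert p.1 (st.1.getD p.1 [] ++ [p.2]), st.2.insert p.2 (st.2.getD p.2 [] ++ [p.1])))
      (PySem.Dict.empty, PySem.Dict.empty) pairs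
      = (List.foldl (fun d p => d.insert p.1 (d.getD p.1 [] ++ [p.2])) PySem.Dict.empty pairs,
         List.foldl (fun d p => d.insert p.2 (d.getD p.2 [] ++ [p.1])) PySem.Dict.empty pairs) :=
    PySem.List.foldl_prod_mk (fun d (p : String × String) => d.insert p.1 (d.getD p.1 [] ++ [p.2]))
      (fun d p => d.insert p.2 (d.getD p.2 [] ++ [p.1])) pairs PySem.Dict.empty PySem.Dict.empty
  rw [hsplit]
  have hgetS : ∀ c, (List.foldl (fun d p => d.insert p.1 (d.getD p.1 [] ++ [p.2])) PySem.Dict.empty pairs).getD c []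
      = (pairs.filter (fun q => q.1 == c)).map Prod.snd := by
    intro c; rw [pv_getD_grp Prod.fst Prod.snd]; simp
  have hgetT : ∀ c, (List.foldl (fun d p => d.insert p.2 (d.getD p.2 [] ++ [p.1])) PySem.Dict.empty pairs).getD c []
      = (pairs.filter (fun q => q.2 == c)).map Prod.fst := by
    intro c; rw [pv_getD_grp Prod.snd Prod.fst]; simp
  have hnodup : (List.foldl (fun d p => d.insert p.1 (d.getD p.1 [] ++ [p.2])) PySem.Dict.empty pairs).keys.Nodup :=
    PySem.Dict.nodup_keys_foldl_insert_key pairs Prod.fst _ _ (by simp)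
  rw [PySem.List.foldl_append_if, PySem.Dict.items_eq_map_keys _ hnodup []]
  simp only [List.nil_append]
  have hkeys : (List.foldl (fun d p => d.insert p.1 (d.getD p.1 [] ++ [p.2])) PySem.Dict.empty pairs).keys
      = pvDedup (pairs.map Prod.fst) := by
    rw [PySem.Dict.keys_foldl_insert_key pairs Prod.fst (fun d x => d.getD x.1 [] ++ [x.2]) PySem.Dict.empty,
        PySem.Dict.keys_empty]
    show List.foldl PySem.Set.add [] (pairs.map Prod.fst) = _
    rw [pv_update_eq_pvDedup]
    simp
  rw [hkeys, List.filter_map, List.map_map]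
  simp only [hgetS, hgetT]
  rw [pv_pvDedup_filter]
  · rw [List.filter_map, List.map_map]
    apply pv_map_filter_congr
    · intro q hq
      simp only [Function.comp_apply, List.length_map, ← List.countP_eq_length_filter]
      unfold pvKeepP
      by_cases hn1 : pairs.countP (fun q' => q'.1 == q.1) = 1
      · have hsing : pairs.filter (fun q' => q'.1 == q.1) = [q] :=
          pv_filter_singleton Prod.fst pairs q hq hn1
        rw [hsing]
        simp
      · have hb : (pairs.countP (fun q' => q'.1 == q.1) == 1) = false := by
          simpa using hn1
        rw [hb]
        simp
    · intro q hq hPq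
      unfold pvKeepP at hPq
      simp only [Bool.and_eq_true, beq_iff_eq] at hPq
      have hsing : pairs.filter (fun q' => q'.1 == q.1) = [q] :=
        pv_filter_singleton Prod.fst pairs q hq hPq.1
      simp [hsing]
  · intro k hk hQ
    simp only [Function.comp_apply, Bool.and_eq_true, List.length_map, beq_iff_eq,
      ← List.countP_eq_length_filter] at hQ
    rw [pv_count_eq_countP]
    exact hQ.1

-- countP = 1 ⟺ index i is the only index satisfying the predicate
theorem pv_countP_one_iff {α : Type} (d : α) (p : α → Bool) :
    ∀ (l : List α) (i : Nat), i < l.length → p (l.getD i d) = true →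
      (l.countP p = 1 ↔ ∀ j, j < l.length → j ≠ i → p (l.getD j d) = false) := by
  intro l
  induction l with
  | nil => intro i hi; simp at hi
  | cons x xs ih =>
      intro i hi hp
      cases i with
      | zero =>
          simp only [List.getD_cons_zero] at hp
          rw [List.countP_cons, hp]
          simp only [if_true]
          constructor
          · intro h1 j hj hj0
            cases j with
            | zero => exact absurd rfl hj0
            | succ j' =>
                have hz : xs.countP p = 0 := by omega
                have hj' : j' < xs.length := by simpa using hj
                simp only [List.getD_cons_succ]
                rw [List.getD_eq_getElem xs d hj']
                have := List.countP_eq_zero.mp hz _ (List.getElem_mem hj')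
                revert this; cases p xs[j'] <;> simp
          · intro h
            have hz : xs.countP p = 0 := by
              rw [List.countP_eq_zero]
              intro a ha
              obtain ⟨j', hj', he⟩ := List.mem_iff_getElem.mp ha
              have := h (j' + 1) (by simpa using Nat.succ_lt_succ hj') (by omega)
              simp only [List.getD_cons_succ] at this
              rw [List.getD_eq_getElem xs d hj', he] at this
              simp [this]
            omega
      | succ i' =>
          simp only [List.getD_cons_succ] at hp
          have hi' : i' < xs.length := by simpa using hi
          have ihs := ih i' hi' hp
          rw [List.countP_cons]
          have hpos : 0 < xs.countP p := by
            rw [List.countP_pos_iff]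
            refine ⟨xs[i'], List.getElem_mem hi', ?_⟩
            rwa [List.getD_eq_getElem xs d hi'] at hp
          constructor
          · intro h1
            have hx : p x = false := by
              by_cases hb : p x = true
              · exfalso
                rw [hb, if_pos rfl] at h1
                omega
              · revert hb; cases p x <;> simp
            have hone : xs.countP p = 1 := by rw [hx] at h1; simpa using h1
            intro j hj hne
            cases j with
            | zero => simpa using hx
            | succ j' =>
                simp only [List.getD_cons_succ]
                exact ihs.mp hone j' (by simpa using hj) (by omega)
          · intro h
            have hx : p x = false := by simpa using h 0 (by omega) (by omega)
            have hone : xs.countP p = 1 := ihs.mpr (fun j hj hne => by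
              simpa using h (j + 1) (by simpa using Nat.succ_lt_succ hj) (by omega))
            simp [hx, hone]

-- (range n).map (getD · d) rebuilds the list
theorem pv_map_getD_range {α : Type} (l : List α) (d : α) :
    (List.range l.length).map (fun i => l.getD i d) = l := by
  apply List.ext_getElem
  · simp
  · intro i h1 h2
    simp [List.getElem?_eq_getElem h2]

-- a filter+map over indices is the filter+map over the list itself
theorem pv_map_filter_range {α β : Type} (l : List α) (d : α) (P : α → Bool) (F : α → β) :
    List.map (fun i => F (l.getD i d)) (List.filter (fun i => P (l.getD i d)) (List.range l.length))
      = List.map F (List.filter P l) := by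
  conv_rhs => rw [← pv_map_getD_range l d]
  rw [List.filter_map, List.map_map]
  rfl

-- B's inner loop (pairwise independence scan over indices) computes the pvKeepP filter
theorem pv_inner_eqB (pairs : List (String × String)) :
    ((List.range pairs.length).foldl (fun kept i =>
        if (List.range pairs.length).all (fun j =>
             j == i || (!((pairs.getD j ("", "")).1 == (pairs.getD i ("", "")).1)
                        && !((pairs.getD j ("", "")).2 == (pairs.getD i ("", "")).2)))
        then kept ++ [(pairs.getD i ("", "")).1 ++ "-" ++ (pairs.getD i ("", "")).2]
        else kept) [])
    = (pairs.filter (pvKeepP pairs)).map (fun p => p.1 ++ "-" ++ p.2) := by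
  rw [PySem.List.foldl_append_if]
  simp only [List.nil_append]
  have hstep : List.map (fun i => (pairs.getD i ("", "")).1 ++ "-" ++ (pairs.getD i ("", "")).2)
      ((List.range pairs.length).filter (fun i =>
        (List.range pairs.length).all (fun j =>
             j == i || (!((pairs.getD j ("", "")).1 == (pairs.getD i ("", "")).1)
                        && !((pairs.getD j ("", "")).2 == (pairs.getD i ("", "")).2)))))
      = List.map (fun i => (fun p : String × String => p.1 ++ "-" ++ p.2) (pairs.getD i ("", "")))
        ((List.range pairs.length).filter (fun i => pvKeepP pairs (pairs.getD i ("", "")))) := by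
    apply pv_map_filter_congr
    · intro i hiR
      have hi : i < pairs.length := List.mem_range.mp hiR
      have hpf : (fun r : String × String => r.1 == (pairs.getD i ("", "")).1) (pairs.getD i ("", "")) = true := by simp
      have hpt : (fun r : String × String => r.2 == (pairs.getD i ("", "")).2) (pairs.getD i ("", "")) = true := by simp
      have hf := pv_countP_one_iff ("", "") (fun r => r.1 == (pairs.getD i ("", "")).1) pairs i hi hpf
      have ht := pv_countP_one_iff ("", "") (fun r => r.2 == (pairs.getD i ("", "")).2) pairs i hi hpt
      rw [Bool.eq_iff_iff]
      simp only [List.all_eq_true, List.mem_range, Bool.or_eq_true, beq_iff_eq,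
        Bool.and_eq_true, Bool.not_eq_true', beq_eq_false_iff_ne, ne_eq]
      unfold pvKeepP
      simp only [Bool.and_eq_true, beq_iff_eq, hf, ht]
      constructor
      · intro hall
        constructor
        · intro j hj hne
          rcases hall j hj with h | h
          · exact absurd h hne
          · simpa using h.1
        · intro j hj hne
          rcases hall j hj with h | h
          · exact absurd h hne
          · simpa using h.2
      · rintro ⟨h1, h2⟩ j hj
        by_cases hje : j = i
        · exact Or.inl hje
        · exact Or.inr ⟨by simpa using h1 j hj hje, by simpa using h2 j hj hje⟩
    · intro i _ _
      rfl
  rw [hstep]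
  exact pv_map_filter_range pairs ("", "") (pvKeepP pairs) (fun p => p.1 ++ "-" ++ p.2)

-- the two inner functions agree on every alignment string (including the ValueError case: both none)
theorem pv_main (a : String) : pvFilterOne2OneA a = pvOne2OneB a := by
  unfold pvFilterOne2OneA pvOne2OneB
  by_cases hall : ∀ w ∈ pvSplit (PySem.Str.rstrip a) " ", (pvSplit w "-").length = 2
  · rw [pv_foldA_good _ hall _, pv_mapM_good _ hall]
    exact congrArg some (congrArg (PySem.Str.join " ")
      ((pv_inner_eqA (List.map pvPairD (pvSplit (PySem.Str.rstrip a) " "))).trans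
        (pv_inner_eqB (List.map pvPairD (pvSplit (PySem.Str.rstrip a) " "))).symm))
  · rw [pv_foldA_bad _ hall _, pv_mapM_bad _ hall]

-- under Pre_, B's mapM over the zipped triples succeeds
theorem pv_mapM_triples_some (l : List (String × String × String))
    (h : ∀ x ∈ l, ∀ wa ∈ pvSplit (PySem.Str.rstrip x.2.2) " ", (pvSplit wa "-").length = 2) :
    ∃ triples, l.mapM (fun x => (pvOne2OneB x.2.2).map (fun fa => (x.1, x.2.1, fa))) = some triples := by
  induction l with
  | nil => exact ⟨[], rfl⟩
  | cons x l ih =>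
      obtain ⟨ts, hts⟩ := ih (fun y hy => h y (by simp [hy]))
      have hx : ∃ fa, pvOne2OneB x.2.2 = some fa := by
        unfold pvOne2OneB
        rw [pv_mapM_good _ (h x (by simp))]
        exact ⟨_, rfl⟩
      obtain ⟨fa, hfa⟩ := hx
      refine ⟨(x.1, x.2.1, fa) :: ts, ?_⟩
      rw [List.mapM_cons, hfa, hts]
      rfl

-- A's outer foldl over three parallel accumulators, rephrased over B's precomputed triples
theorem pv_outer (l : List (String × String × String)) :
    ∀ (triples : List (String × String × String)) (as bs cs : List String),
      l.mapM (fun x => (pvOne2OneB x.2.2).map (fun fa => (x.1, x.2.1, fa))) = some triples →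
      l.foldl (fun acc x => match pvOne2OneB x.2.2 with
        | none => acc
        | some al => if al == "" then acc
            else (acc.1 ++ [x.1], acc.2.1 ++ [x.2.1], acc.2.2 ++ [al])) (as, bs, cs)
      = (as ++ (triples.filter (fun y => y.2.2 != "")).map (·.1),
         bs ++ (triples.filter (fun y => y.2.2 != "")).map (·.2.1),
         cs ++ (triples.filter (fun y => y.2.2 != "")).map (·.2.2)) := by
  induction l with
  | nil =>
      intro triples as bs cs h
      have : triples = [] := by simpa using h.symm
      subst this
      simp
  | cons x l ih =>
      intro triples as bs cs h
      rw [List.mapM_cons] at h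
      cases hx : pvOne2OneB x.2.2 with
      | none => rw [hx] at h; simp at h
      | some fa =>
          rw [hx] at h
          cases hrest : l.mapM (fun x => (pvOne2OneB x.2.2).map (fun fa => (x.1, x.2.1, fa))) with
          | none => rw [hrest] at h; simp at h
          | some ts =>
              rw [hrest] at h
              have htr : triples = (x.1, x.2.1, fa) :: ts := by
                simpa using h.symm
              subst htr
              simp only [List.foldl_cons, hx, List.filter_cons]
              by_cases hfa : fa == ""
              · have hne : ((x.1, x.2.1, fa).2.2 != "") = false := by
                  simpa using hfa
                rw [hne]
                simp only [Bool.false_eq_true, if_false, hfa, if_true]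
                exact ih ts as bs cs hrest
              · have hne : ((x.1, x.2.1, fa).2.2 != "") = true := by
                  simpa using hfa
                rw [hne]
                simp only [if_true, hfa, Bool.false_eq_true, if_false]
                rw [ih ts (as ++ [x.1]) (bs ++ [x.2.1]) (cs ++ [fa]) hrest]
                simp

-- ===== VERDICT (by name: the statement is the Claim_ definition above) =====
theorem filter_not_one2one_alignment_spec : Claim_equal_filter_not_one2one_alignment := by
  intro src tgt aligns _ hpre
  unfold Spec_filter_not_one2one_alignment filter_not_one2one_alignment filter_not_one2one_alignment_alt
  obtain ⟨triples, htr⟩ := pv_mapM_triples_some _ hpre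
  rw [htr]
  simp only [pv_main]
  rw [pv_outer _ triples [] [] [] htr]
  simp
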